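-- pv_equiv track=rewrite | github.com/RafailTn/msc-thesis | src/intarna_fe.py | get_mre_position_map
-- ===== SOURCE A (Python) =====
-- def get_mre_position_map(total_vec):
--     """Returns mapping: vector_index -> MRE_position (0-indexed within binding region)."""
--     position_map = {}
--     mre_pos = 0
--     for vec_idx, char in enumerate(total_vec):
--         if char in '123De':
--             position_map[vec_idx] = mre_pos
--             mre_pos += 1
--         elif char in '4d':
--             position_map[vec_idx] = None
--         else:
--             position_map[vec_idx] = mre_pos
--     return position_map
-- ===== SOURCE B (Python) =====
-- def _count_less(sorted_idx, x):
--     """Binary search: number of entries of the sorted list strictly below x."""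
--     lo, hi = 0, len(sorted_idx)
--     while lo < hi:
--         mid = (lo + hi) // 2
--         if sorted_idx[mid] < x:
--             lo = mid + 1
--         else:
--             hi = mid
--     return lo
--
-- def get_mre_position_map(total_vec):
--     """Returns mapping: vector_index -> MRE_position (0-indexed within binding region)."""
--     mre_idx = [i for i, c in enumerate(total_vec) if c in '123De']
--     return {i: (None if c in '4d' else _count_less(mre_idx, i))
--             for i, c in enumerate(total_vec)}
-- ===== Notes on version B (the rewrite author's own statement) =====
-- stated objective: alternative
-- what changed: Instead of a single pass with a running counter, B first collects the sorted list of indices of MRE characters and then answers every position with a hand-written binary search counting the MRE indices strictly below it (None on the deletion markers).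
import Mathlib
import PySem

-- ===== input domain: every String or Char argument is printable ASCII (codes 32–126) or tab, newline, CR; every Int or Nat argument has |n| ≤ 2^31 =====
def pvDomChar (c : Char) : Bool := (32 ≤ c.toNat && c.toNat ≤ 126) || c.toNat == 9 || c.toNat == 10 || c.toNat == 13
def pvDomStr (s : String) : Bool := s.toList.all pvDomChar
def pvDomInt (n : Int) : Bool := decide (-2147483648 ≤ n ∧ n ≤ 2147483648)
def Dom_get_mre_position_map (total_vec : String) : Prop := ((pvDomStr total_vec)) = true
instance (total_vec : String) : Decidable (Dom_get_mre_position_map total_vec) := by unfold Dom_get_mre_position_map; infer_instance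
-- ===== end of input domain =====

-- B replaces A's running counter with a collected sorted list of MRE indices queried by
-- binary search per position (alternative algorithm, same return value; proved equal).

-- ===== PORT A =====
-- literal port: dict + running counter, one branching loop over enumerate(total_vec)
def get_mre_position_map (total_vec : String) : List (Int × Option Int) :=
  let st := (PySem.List.enumerate total_vec.toList).foldl
    (fun (st : PySem.Dict Int (Option Int) × Int) p =>
      if p.2 ∈ "123De".toList then (st.1.insert p.1 (some st.2), st.2 + 1)
      else if p.2 ∈ "4d".toList then (st.1.insert p.1 none, st.2)
      else (st.1.insert p.1 (some st.2), st.2))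
    (PySem.Dict.mk [], 0)
  st.1.items

-- ===== PORT B =====
-- the while-loop of _count_less; lo/hi/mid are nonnegative Python ints (Nat here), '//2' = Nat '/2';
-- sorted_idx[mid] is always in range during the loop (mid < hi ≤ len), so getD is exact
def pvCountLessLoop (l : List Int) (x : Int) (lo hi : Nat) : Nat :=
  if _h : lo < hi then
    let mid := (lo + hi) / 2
    if l.getD mid 0 < x then pvCountLessLoop l x (mid + 1) hi
    else pvCountLessLoop l x lo mid
  else lo
termination_by hi - lo
decreasing_by all_goals omega

-- collect the sorted list of MRE indices, then one comprehension answering each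
-- position by binary search (None on '4d')
def get_mre_position_map_alt (total_vec : String) : List (Int × Option Int) :=
  let mreIdx := ((PySem.List.enumerate total_vec.toList).filter
      (fun p => p.2 ∈ "123De".toList)).map (fun p => p.1)
  (PySem.List.enumerate total_vec.toList).map
    (fun p => (p.1, if p.2 ∈ "4d".toList then none
                    else some ((pvCountLessLoop mreIdx p.1 0 mreIdx.length : Nat) : Int)))

-- ===== PRECONDITION & SPEC =====
def Spec_get_mre_position_map (total_vec : String) (out : List (Int × Option Int)) : Prop := out = get_mre_position_map_alt total_vec
instance (total_vec : String) (out : List (Int × Option Int)) : Decidable (Spec_get_mre_position_map total_vec out) := by unfold Spec_get_mre_position_map; infer_instance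

-- ===== CLAIM (what is proved, stated in full; the proofs are below) =====
def Claim_equal_get_mre_position_map : Prop := ∀ (total_vec : String), Dom_get_mre_position_map total_vec → Spec_get_mre_position_map total_vec (get_mre_position_map total_vec)

-- ===== LEMMAS AND PROOFS =====

-- the common shape both programs produce, as a structural recursion
def pvG (cs : List Char) (s m : Int) : List (Int × Option Int) :=
  match cs with
  | [] => []
  | c :: cs =>
    (s, if c ∈ "4d".toList then none else some m)
      :: pvG cs (s + 1) (m + (if c ∈ "123De".toList then 1 else 0))

lemma pvG_eq_A : ∀ (cs : List Char) (s : Int) (d : PySem.Dict Int (Option Int)) (m : Int),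
    (∀ k ∈ d.keys, k < s) →
    ((PySem.List.enumerate cs s).foldl
      (fun (st : PySem.Dict Int (Option Int) × Int) p =>
        if p.2 ∈ "123De".toList then (st.1.insert p.1 (some st.2), st.2 + 1)
        else if p.2 ∈ "4d".toList then (st.1.insert p.1 none, st.2)
        else (st.1.insert p.1 (some st.2), st.2))
      (d, m)).1.items
    = d.items ++ pvG cs s m := by
  intro cs
  induction cs with
  | nil => intro s d m _; simp [pvG]
  | cons c cs ih =>
    intro s d m hk
    have hfresh : d.contains s = false := by
      rw [PySem.Dict.contains_eq_decide_mem_keys]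
      simp only [decide_eq_false_iff_not]
      intro hs; exact absurd (hk s hs) (lt_irrefl s)
    have hkeys : ∀ v, ∀ k ∈ (d.insert s v).keys, k < s + 1 := by
      intro v k hkmem
      have : k = s ∨ k ∈ d.keys := by
        rcases List.mem_map.mp hkmem with ⟨p, hp, hpk⟩
        rw [PySem.Dict.mem_items_insert] at hp
        rcases hp with h | h
        · left; rw [← hpk, h]
        · right; exact hpk ▸ List.mem_map_of_mem h.1
      rcases this with h | h
      · omega
      · have := hk k h; omega
    have hitems : ∀ v, (d.insert s v).items = d.items ++ [(s, v)] := fun v => by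
      rw [PySem.Dict.items_insert, hfresh]; simp
    rw [PySem.List.enumerate_cons]
    simp only [List.foldl_cons, pvG]
    by_cases h1 : c ∈ "123De".toList
    · have h2 : c ∉ "4d".toList := fun h2 => by fin_cases h2 <;> exact absurd h1 (by decide)
      simp only [h1, h2, if_pos, if_neg, not_false_eq_true]
      rw [ih (s + 1) _ (m + 1) (hkeys _), hitems]
      simp
    · by_cases h2 : c ∈ "4d".toList
      · simp only [h1, h2, if_pos, if_neg, not_false_eq_true]
        rw [ih (s + 1) _ m (hkeys _), hitems]
        simp
      · simp only [h1, h2, if_neg, not_false_eq_true]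
        rw [ih (s + 1) _ m (hkeys _), hitems]
        simp

-- binary-search loop invariant: the result r satisfies "l[j] < x ↔ j < r"
lemma pvCountLessLoop_spec (l : List Int) (x : Int)
    (hsort : l.Pairwise (· < ·)) :
    ∀ (n lo hi : Nat), hi - lo = n → lo ≤ hi → hi ≤ l.length →
    (∀ j, j < lo → ∀ (h : j < l.length), l[j] < x) →
    (∀ j, hi ≤ j → ∀ (h : j < l.length), ¬ l[j] < x) →
    lo ≤ pvCountLessLoop l x lo hi ∧ pvCountLessLoop l x lo hi ≤ hi ∧
    (∀ j, (h : j < l.length) → (l[j] < x ↔ j < pvCountLessLoop l x lo hi)) := by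
  have hpw := List.pairwise_iff_getElem.mp hsort
  intro n
  induction n using Nat.strong_induction_on with
  | _ n ih =>
    intro lo hi hn hlohi hhile hlow hhigh
    rw [pvCountLessLoop]
    by_cases h : lo < hi
    · simp only [h, dif_pos]
      have hmid1 : (lo + hi) / 2 < hi := by omega
      have hmid2 : lo ≤ (lo + hi) / 2 := by omega
      have hmidlen : (lo + hi) / 2 < l.length := by omega
      rw [List.getD_eq_getElem l 0 hmidlen]
      by_cases hcmp : l[(lo + hi) / 2] < x
      · simp only [hcmp, if_pos]
        have hlow' : ∀ j, j < (lo + hi) / 2 + 1 → ∀ (hj : j < l.length), l[j] < x := by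
          intro j hj hjlen
          rcases Nat.lt_or_ge j ((lo + hi) / 2) with hlt | hge
          · exact lt_trans (hpw j ((lo+hi)/2) hjlen hmidlen hlt) hcmp
          · have : j = (lo + hi) / 2 := by omega
            subst this; exact hcmp
        have := ih (hi - ((lo + hi) / 2 + 1)) (by omega) ((lo + hi) / 2 + 1) hi rfl
          (by omega) hhile hlow' hhigh
        exact ⟨by omega, this.2.1, this.2.2⟩
      · simp only [hcmp, if_neg, not_false_eq_true]
        have hhigh' : ∀ j, (lo + hi) / 2 ≤ j → ∀ (hj : j < l.length), ¬ l[j] < x := by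
          intro j hj hjlen hjx
          rcases Nat.lt_or_ge ((lo + hi) / 2) j with hlt | hge
          · exact hcmp (lt_trans (hpw ((lo+hi)/2) j hmidlen hjlen hlt) hjx)
          · have : j = (lo + hi) / 2 := by omega
            subst this; exact hcmp hjx
        have := ih ((lo + hi) / 2 - lo) (by omega) lo ((lo + hi) / 2) rfl
          (by omega) (by omega) hlow hhigh'
        exact ⟨this.1, by omega, this.2.2⟩
    · simp only [h, dif_neg, not_false_eq_true]
      have : lo = hi := by omega
      refine ⟨le_refl _, le_of_eq this, ?_⟩
      intro j hj
      constructor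
      · intro hjx
        by_contra hge
        exact hhigh j (by omega) hj hjx
      · intro hjlo; exact hlow j hjlo hj

-- a predicate holding exactly on the first r positions is counted r times
lemma countP_of_prefix {p : Int → Bool} :
    ∀ (l : List Int) (r : Nat), r ≤ l.length →
    (∀ j, (h : j < l.length) → (p l[j] = true ↔ j < r)) → l.countP p = r := by
  intro l
  induction l with
  | nil =>
    intro r hr _
    simp only [List.length_nil, Nat.le_zero] at hr
    simp [hr]
  | cons a l ih =>
    intro r hr hiff
    rcases Nat.eq_zero_or_pos r with h0 | hpos
    · subst h0
      have ha : p a = false := by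
        have := hiff 0 (by simp)
        simp at this; simpa using this
      have : l.countP p = 0 := by
        apply ih 0 (by omega)
        intro j hj
        have := hiff (j+1) (by simpa using Nat.succ_lt_succ hj)
        simpa using this
      simp [ha, this]
    · have ha : p a = true := (hiff 0 (by simp)).mpr hpos
      have htail : l.countP p = r - 1 := by
        apply ih (r-1) (by simp at hr; omega)
        intro j hj
        have := hiff (j+1) (by simpa using Nat.succ_lt_succ hj)
        simp at this; rw [this]; omega
      simp [ha, htail]; omega

-- binary search over a sorted list counts the elements strictly below x
lemma pvCountLessLoop_eq_countP (l : List Int) (x : Int) (hsort : l.Pairwise (· < ·)) :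
    pvCountLessLoop l x 0 l.length = l.countP (fun a => a < x) := by
  have h := pvCountLessLoop_spec l x hsort (l.length - 0) 0 l.length rfl (by omega) (le_refl _)
    (by omega) (by intro j hj hjl; omega)
  exact (countP_of_prefix l _ h.2.1 (by intro j hj; simpa using (h.2.2 j hj))).symm

-- ===== relating the mreIdx list to the characters =====

def pvMreIdx (cs : List Char) : List Int :=
  ((PySem.List.enumerate cs 0).filter (fun p => p.2 ∈ "123De".toList)).map (fun p => p.1)

lemma pvMreIdx_sorted (cs : List Char) : (pvMreIdx cs).Pairwise (· < ·) := by
  unfold pvMreIdx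
  rw [List.pairwise_map]
  exact List.Pairwise.filter _ (PySem.List.pairwise_lt_enumerate cs 0)

lemma pvMreIdx_mem (cs : List Char) (i : Int) :
    i ∈ pvMreIdx cs ↔ ∃ (k : Nat) (h : k < cs.length), i = (k : Int) ∧ cs[k] ∈ "123De".toList := by
  unfold pvMreIdx
  simp only [List.mem_map, List.mem_filter, PySem.List.mem_enumerate_iff]
  constructor
  · rintro ⟨p, ⟨⟨k, hk, rfl⟩, hp⟩, rfl⟩
    exact ⟨k, hk, by omega, by simpa using hp⟩
  · rintro ⟨k, hk, rfl, hmem⟩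
    exact ⟨((k : Int), cs[k]), ⟨⟨k, hk, by simp⟩, by simpa using hmem⟩, rfl⟩

lemma pvMreIdx_nodup (cs : List Char) : (pvMreIdx cs).Nodup :=
  (pvMreIdx_sorted cs).imp (fun h => ne_of_lt h)

lemma pvMreIdx_nonneg (cs : List Char) : ∀ i ∈ pvMreIdx cs, 0 ≤ i := by
  intro i hi
  rcases (pvMreIdx_mem cs i).mp hi with ⟨k, _, rfl, _⟩
  omega

-- counting step: moving the threshold from k to k+1 adds 1 iff cs[k] is an MRE char
lemma pvCnt_step (cs : List Char) (k : Nat) (hk : k < cs.length) :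
    (pvMreIdx cs).countP (fun a => a < (k : Int) + 1)
    = (pvMreIdx cs).countP (fun a => a < (k : Int))
      + (if cs[k] ∈ "123De".toList then 1 else 0) := by
  have hsplit : (pvMreIdx cs).countP (fun a => a < (k : Int) + 1)
      = (pvMreIdx cs).countP (fun a => a < (k : Int)) + (pvMreIdx cs).count (k : Int) := by
    rw [List.count_eq_countP]
    induction pvMreIdx cs with
    | nil => simp
    | cons a l ihl =>
      simp only [List.countP_cons, ihl]
      by_cases h1 : a < (k : Int) + 1 <;> by_cases h2 : a < (k : Int) <;>
        by_cases h3 : a = (k : Int) <;> simp [h1, h2, h3] <;> omega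
  rw [hsplit]
  congr 1
  by_cases hmem : (k : Int) ∈ pvMreIdx cs
  · rcases (pvMreIdx_mem cs (k : Int)).mp hmem with ⟨k', hk', hkk, hc⟩
    have hkeq : k' = k := by omega
    subst hkeq
    rw [List.count_eq_one_of_mem (pvMreIdx_nodup cs) hmem, if_pos hc]
  · have hnc : cs[k] ∉ "123De".toList := fun hc => hmem ((pvMreIdx_mem cs _).mpr ⟨k, hk, rfl, hc⟩)
    rw [List.count_eq_zero_of_not_mem hmem, if_neg hnc]

-- B's comprehension with an abstract count function f equals pvG, given the step law for f
lemma pvB_abstract : ∀ (cs : List Char) (s : Int) (f : Int → Int),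
    (∀ p ∈ PySem.List.enumerate cs s,
        f (p.1 + 1) = f p.1 + (if p.2 ∈ "123De".toList then 1 else 0)) →
    (PySem.List.enumerate cs s).map
      (fun p => (p.1, if p.2 ∈ "4d".toList then none else some (f p.1)))
    = pvG cs s (f s) := by
  intro cs
  induction cs with
  | nil => intro s f _; simp [pvG]
  | cons c cs ih =>
    intro s f hf
    rw [PySem.List.enumerate_cons]
    simp only [List.map_cons, pvG]
    have hhead := hf (s, c) (by rw [PySem.List.enumerate_cons]; exact List.mem_cons_self ..)
    have htail := ih (s + 1) f (fun p hp => hf p (by rw [PySem.List.enumerate_cons]; exact List.mem_cons_of_mem _ hp))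
    rw [htail]
    simp only at hhead
    rw [hhead]

-- ===== VERDICT (by name: the statement is the Claim_ definition above) =====
theorem get_mre_position_map_spec : Claim_equal_get_mre_position_map := by
  intro s _
  show get_mre_position_map s = get_mre_position_map_alt s
  have hA : get_mre_position_map s = pvG s.toList 0 0 := by
    unfold get_mre_position_map
    rw [pvG_eq_A s.toList 0 (PySem.Dict.mk []) 0 (by simp [PySem.Dict.keys])]
    rfl
  have hB : get_mre_position_map_alt s = pvG s.toList 0 0 := by
    show (PySem.List.enumerate s.toList).map
      (fun p => (p.1, if p.2 ∈ "4d".toList then none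
                    else some ((pvCountLessLoop (pvMreIdx s.toList) p.1 0 (pvMreIdx s.toList).length : Nat) : Int)))
      = pvG s.toList 0 0
    have hmap : (PySem.List.enumerate s.toList).map
        (fun p => (p.1, if p.2 ∈ "4d".toList then none
                      else some ((pvCountLessLoop (pvMreIdx s.toList) p.1 0 (pvMreIdx s.toList).length : Nat) : Int)))
        = (PySem.List.enumerate s.toList).map
        (fun p => (p.1, if p.2 ∈ "4d".toList then none
                      else some (((pvMreIdx s.toList).countP (fun a => a < p.1) : Int)))) := by
      apply List.map_congr_left
      intro p _
      rw [pvCountLessLoop_eq_countP _ _ (pvMreIdx_sorted s.toList)]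
    have hstep : ∀ p ∈ PySem.List.enumerate s.toList (0 : Int),
        ((pvMreIdx s.toList).countP (fun a => a < p.1 + 1) : Int)
        = ((pvMreIdx s.toList).countP (fun a => a < p.1) : Int)
          + (if p.2 ∈ "123De".toList then 1 else 0) := by
      intro p hp
      rcases (PySem.List.mem_enumerate_iff _ _ _).mp hp with ⟨k, hk, rfl⟩
      simp only [Int.zero_add]
      rw [pvCnt_step s.toList k hk]
      push_cast
      split_ifs <;> simp
    have hzero : ((pvMreIdx s.toList).countP (fun a => a < (0 : Int)) : Int) = 0 := by
      have h0 : (pvMreIdx s.toList).countP (fun a => a < (0 : Int)) = 0 := by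
        rw [List.countP_eq_zero]
        intro a ha
        have := pvMreIdx_nonneg s.toList a ha
        simpa using by omega
      rw [h0]; rfl
    rw [hmap, pvB_abstract s.toList 0 (fun i => ((pvMreIdx s.toList).countP (fun a => a < i) : Int)) hstep]
    simp only [hzero]
  rw [hA, hB]
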